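-- pv_equiv track=rewrite | github.com/hyeonjun/AlgorithmTest | ProGrammers/Lv2/level_2_Another_Bit.py | solution
-- ===== SOURCE A (Python) =====
-- def solution(numbers):
--     answer = []
--     for i in numbers:
--         tmp = list('0' + bin(i)[2:])
--         idx = ''.join(tmp).rfind('0')
--         tmp[idx] = '1'
--         if i % 2 == 1:
--             tmp[idx+1] = '0'
--         answer.append(int(''.join(tmp), 2))
--     return answer
-- ===== SOURCE B (Python) =====
-- def solution(numbers):
--     # One right-to-left pass per number: accumulate the output value directly
--     # (doubling weight w), instead of A's build-list / rfind / mutate / re-parse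
--     # staging. The first '0' seen from the right counts as a '1'; when the
--     # number is odd, the '1' passed just before it (if any) is taken back.
--     def value(i):
--         acc, w, prev, seen = 0, 1, '', False
--         for c in reversed('0' + bin(i)[2:]):
--             if c == '0' and not seen:
--                 acc += w
--                 if i % 2 and prev == '1':
--                     acc -= w >> 1
--                 seen = True
--             elif c == '1':
--                 acc += w
--             w += w
--             prev = c
--         return acc
--     return [value(i) for i in numbers]
-- ===== Notes on version B (the rewrite author's own statement) =====
-- stated objective: alternative
-- what changed: B replaces A's staged string surgery (build a char list, rfind the last '0', two in-place writes, join and int(...,2) re-parse) by a single right-to-left pass that accumulates the output integer directly with a doubling weight, never building or re-parsing a string.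
import Mathlib
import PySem

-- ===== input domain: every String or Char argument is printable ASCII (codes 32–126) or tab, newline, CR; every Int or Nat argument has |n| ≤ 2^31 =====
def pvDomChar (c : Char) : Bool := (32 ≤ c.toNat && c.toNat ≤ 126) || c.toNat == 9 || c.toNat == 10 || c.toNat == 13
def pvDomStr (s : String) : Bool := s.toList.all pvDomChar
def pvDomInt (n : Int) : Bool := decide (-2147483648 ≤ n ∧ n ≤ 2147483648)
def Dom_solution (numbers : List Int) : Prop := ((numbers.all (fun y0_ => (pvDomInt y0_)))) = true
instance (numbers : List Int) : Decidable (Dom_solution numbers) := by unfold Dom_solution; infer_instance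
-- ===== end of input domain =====

-- B replaces A's staged string surgery (char list, rfind, two writes, join + int re-parse)
-- by a single right-to-left pass accumulating the output integer directly.

-- ===== PORT A =====
-- hand port of int(s, 2) as used by A: an optional '0b' prefix, then a left-to-right
-- digit loop. Exact for every string this program constructs (a '0b'-prefixed or plain
-- binary digit string: no sign, no whitespace, no underscores, digits in {'0','1'});
-- none = ValueError (never reached here). Ported by hand because the proof needs the
-- digit loop's recursion, which PySem.Int.ofCharsBase? does not expose.
def int2Go (cs : List Char) (acc : Nat) : Option Nat :=
  match cs with
  | [] => some acc
  | c :: rest =>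
      if c = '0' then int2Go rest (2 * acc)
      else if c = '1' then int2Go rest (2 * acc + 1)
      else none

def int2? (cs : List Char) : Option Nat :=
  match cs with
  | '0' :: 'b' :: rest => if rest.isEmpty then none else int2Go rest 0
  | [] => none
  | _ => int2Go cs 0

-- per-element body of A's loop: tmp = list('0' + bin(i)[2:]); idx = ''.join(tmp).rfind('0');
-- tmp[idx] = '1'; if i % 2 == 1: tmp[idx+1] = '0'; int(''.join(tmp), 2).
-- ''.join over a list of single chars is the string of those chars, so rfind is ported at
-- the char-list level (PySem.Chars.rfind, Python-exact). A's int(...) never raises on the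
-- strings built here, so the .getD 0 default is never taken.
def solutionElemA (i : Int) : Int :=
  let tmp : List Char := '0' :: PySem.List.slice (PySem.Int.toBinChars0b i) (some 2) none
  let idx : Int := PySem.Chars.rfind tmp ['0']
  let tmp1 : List Char := PySem.List.pySetD tmp idx '1'
  let tmp2 : List Char := if PySem.Int.mod i 2 == 1 then PySem.List.pySetD tmp1 (idx + 1) '0' else tmp1
  (((int2? tmp2).getD 0 : Nat) : Int)

def solution (numbers : List Int) : List Int :=
  numbers.foldl (fun answer i => answer ++ [solutionElemA i]) []

-- ===== PORT B =====
-- loop body of B's inner `for c in reversed('0' + bin(i)[2:])` over the state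
-- (acc, w, prev, seen); prev starts as '' in Python, ported as Option Char (none = '').
-- Python's `acc += w; if i % 2 and prev == '1': acc -= w >> 1` is the one expression
-- acc + w - (if … then w >> 1 else 0); w >> 1 on the positive w is floor division by 2.
def stepB (i : Int) (st : Int × Int × Option Char × Bool) (c : Char) : Int × Int × Option Char × Bool :=
  let acc := st.1
  let w := st.2.1
  let prev := st.2.2.1
  let seen := st.2.2.2
  let acc' :=
    if c == '0' && !seen then
      acc + w - (if PySem.Int.mod i 2 == 1 && prev == some '1' then PySem.Int.floordiv w 2 else 0)
    else if c == '1' then acc + w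
    else acc
  (acc', w + w, some c, seen || (c == '0' && !seen))

def solutionElemB (i : Int) : Int :=
  ((('0' :: PySem.List.slice (PySem.Int.toBinChars0b i) (some 2) none).reverse).foldl
    (stepB i) (0, 1, none, false)).1

def solution_alt (numbers : List Int) : List Int := numbers.map solutionElemB

-- ===== PRECONDITION & SPEC =====
def Spec_solution (numbers : List Int) (out : List Int) : Prop := out = solution_alt numbers
instance (numbers : List Int) (out : List Int) : Decidable (Spec_solution numbers out) := by unfold Spec_solution; infer_instance

-- ===== CLAIM (what is proved, stated in full; the proofs are below) =====
def Claim_equal_solution : Prop := ∀ (numbers : List Int), Dom_solution numbers → Spec_solution numbers (solution numbers)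

-- ===== LEMMAS AND PROOFS =====

-- value of a binary char list, '1' counted by place value, any other char worth 0
def bvalN : List Char → Nat
  | [] => 0
  | c :: cs => (if c = '1' then 2 ^ cs.length else 0) + bvalN cs

theorem bvalN_append (x y : List Char) :
    bvalN (x ++ y) = bvalN x * 2 ^ y.length + bvalN y := by
  induction x with
  | nil => simp [bvalN]
  | cons c cs ih =>
    simp only [List.cons_append, bvalN, ih, List.length_append]
    split_ifs <;> ring

theorem int2Go_01 (cs : List Char) (h : ∀ c ∈ cs, c = '0' ∨ c = '1') :
    ∀ acc, int2Go cs acc = some (acc * 2 ^ cs.length + bvalN cs) := by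
  induction cs with
  | nil => intro acc; simp [int2Go, bvalN]
  | cons c cs ih =>
    intro acc
    have h0 := h c (by simp)
    have hrest : ∀ c ∈ cs, c = '0' ∨ c = '1' := fun d hd => h d (by simp [hd])
    rcases h0 with h0 | h0 <;> subst h0 <;>
      simp [int2Go, ih hrest, bvalN, pow_succ] <;> ring

theorem int2?_default (c d : Char) (cs : List Char) (hdb : d ≠ 'b') :
    int2? (c :: d :: cs) = int2Go (c :: d :: cs) 0 := by
  unfold int2?
  split
  · next heq => simp_all
  · next heq => simp_all
  · rfl

theorem int2?_01 (cs : List Char) (hne : cs ≠ []) (h : ∀ c ∈ cs, c = '0' ∨ c = '1') :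
    int2? cs = some (bvalN cs) := by
  have hgo := int2Go_01 cs h 0
  simp only [Nat.zero_mul, Nat.zero_add] at hgo
  rcases cs with _ | ⟨c, cs⟩
  · exact absurd rfl hne
  rcases cs with _ | ⟨d, cs⟩
  · rcases h c (by simp) with h0 | h0 <;> subst h0 <;> simpa [int2?] using hgo
  · have hdb : d ≠ 'b' := by
      rcases h d (by simp) with h0 | h0 <;> subst h0 <;> decide
    rw [int2?_default c d cs hdb]
    exact hgo

theorem int2?_0b (rest : List Char) (hne : rest ≠ []) (h : ∀ c ∈ rest, c = '0' ∨ c = '1') :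
    int2? ('0' :: 'b' :: rest) = some (bvalN rest) := by
  have hgo := int2Go_01 rest h 0
  simp [int2?, List.isEmpty_iff, hne, hgo]

-- Nat.toDigitsCore conses the digit of n % base first, so it is the LAST digit of the result.
theorem toDigitsCore_succ (f n : Nat) (ds : List Char) :
    Nat.toDigitsCore 2 (f + 1) n ds =
      if n / 2 = 0 then (n % 2).digitChar :: ds
      else Nat.toDigitsCore 2 f (n / 2) ((n % 2).digitChar :: ds) := by
  rw [Nat.toDigitsCore]

theorem toDigitsCore_last (fuel n : Nat) (ds : List Char) (hn : n ≤ fuel) :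
    ∃ X : List Char, Nat.toDigitsCore 2 (fuel + 1) n ds = X ++ (n % 2).digitChar :: ds := by
  induction fuel generalizing n ds with
  | zero =>
    refine ⟨[], ?_⟩
    rw [toDigitsCore_succ]
    have hn0 : n = 0 := by omega
    subst hn0
    simp
  | succ f ih =>
    by_cases h2 : n / 2 = 0
    · refine ⟨[], ?_⟩
      rw [toDigitsCore_succ, if_pos h2]
      simp
    · obtain ⟨X, hX⟩ := ih (n / 2) ((n % 2).digitChar :: ds) (by omega)
      refine ⟨X ++ [(n / 2 % 2).digitChar], ?_⟩
      rw [toDigitsCore_succ, if_neg h2, hX]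
      simp

theorem toDigitsCore_01 (fuel n : Nat) (ds : List Char)
    (hds : ∀ c ∈ ds, c = '0' ∨ c = '1') :
    ∀ c ∈ Nat.toDigitsCore 2 fuel n ds, c = '0' ∨ c = '1' := by
  induction fuel generalizing n ds with
  | zero => simpa [Nat.toDigitsCore] using hds
  | succ f ih =>
    rw [toDigitsCore_succ]
    have hdigit : (n % 2).digitChar = '0' ∨ (n % 2).digitChar = '1' := by
      have : n % 2 = 0 ∨ n % 2 = 1 := by omega
      rcases this with h | h <;> rw [h] <;> simp [Nat.digitChar]
    split
    · intro c hc
      rcases List.mem_cons.mp hc with h | h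
      · subst h; exact hdigit
      · exact hds c h
    · exact ih (n / 2) _ (fun c hc => by
        rcases List.mem_cons.mp hc with h | h
        · subst h; exact hdigit
        · exact hds c h)

theorem toDigits_01 (n : Nat) : ∀ c ∈ Nat.toDigits 2 n, c = '0' ∨ c = '1' :=
  toDigitsCore_01 (n + 1) n [] (by simp)

-- the binary string '0' + bin(i)[2:] as a char list
def sList (i : Int) : List Char :=
  '0' :: PySem.List.slice (PySem.Int.toBinChars0b i) (some 2) none

theorem sList_eq (i : Int) :
    sList i = if i < 0 then '0' :: 'b' :: Nat.toDigits 2 i.natAbs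
              else '0' :: Nat.toDigits 2 i.toNat := by
  unfold sList PySem.Int.toBinChars0b
  split <;> rw [PySem.List.slice_from _ (by norm_num : (0:Int) ≤ 2)] <;> rfl

-- an odd i ends its binary string with '1'
theorem sList_odd_last (i : Int) (h : PySem.Int.mod i 2 = 1) :
    ∃ Y : List Char, sList i = Y ++ ['1'] := by
  have h2 : i % 2 = 1 := by rw [← PySem.Int.mod_eq_emod_of_pos (by norm_num : (0:Int) < 2)]; exact h
  rw [sList_eq]
  split
  · obtain ⟨X, hX⟩ := toDigitsCore_last i.natAbs i.natAbs [] le_rfl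
    have hm : i.natAbs % 2 = 1 := by omega
    refine ⟨'0' :: 'b' :: X, ?_⟩
    simp only [Nat.toDigits, hX, hm]
    norm_num
    decide
  · obtain ⟨X, hX⟩ := toDigitsCore_last i.toNat i.toNat [] le_rfl
    have hm : i.toNat % 2 = 1 := by omega
    refine ⟨'0' :: X, ?_⟩
    simp only [Nat.toDigits, hX, hm]
    norm_num
    decide

-- rfind of '0' on u ++ '0' :: v with no '0' in v finds exactly position u.length
theorem rfind_go_last (u v : List Char) (hv : ∀ c ∈ v, c ≠ '0') :
    ∀ m : Nat, m ≤ v.length + 1 →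
      PySem.Chars.rfind.go (u ++ '0' :: v) ['0'] (u.length + m) = (u.length : Int) := by
  intro m
  induction m with
  | zero =>
    intro _
    cases hu : u.length with
    | zero =>
      have : u = [] := List.length_eq_zero_iff.mp hu
      subst this
      simp [PySem.Chars.rfind.go, List.isPrefixOf]
    | succ k =>
      have hdrop : (u ++ '0' :: v).drop (k + 1) = '0' :: v := by
        rw [← hu]; exact List.drop_left
      simp [PySem.Chars.rfind.go, hdrop, List.isPrefixOf]
  | succ m ih =>
    intro hm
    have hdrop : (u ++ '0' :: v).drop (u.length + m + 1) = v.drop m := by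
      rw [show u.length + m + 1 = u.length + (m + 1) by omega, List.drop_append]
      simp [List.drop_eq_nil_of_le]
    have hpre : (['0'] : List Char).isPrefixOf ((u ++ '0' :: v).drop (u.length + m + 1)) = false := by
      rw [hdrop]
      cases hd : v.drop m with
      | nil => rfl
      | cons w rest =>
        have hw : w ∈ v := by
          have : w ∈ v.drop m := by rw [hd]; exact List.mem_cons_self
          exact List.mem_of_mem_drop this
        have : w ≠ '0' := hv w hw
        simp [List.isPrefixOf, Ne.symm this]
    have : u.length + (m + 1) = (u.length + m) + 1 := by omega
    rw [this]
    simp only [PySem.Chars.rfind.go, hpre]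
    simpa using ih (by omega)

theorem rfind_last (u v : List Char) (hv : ∀ c ∈ v, c ≠ '0') :
    PySem.Chars.rfind (u ++ '0' :: v) ['0'] = (u.length : Int) := by
  have h := rfind_go_last u v hv (v.length + 1) le_rfl
  unfold PySem.Chars.rfind
  have hlen : (u ++ '0' :: v).length = u.length + (v.length + 1) := by simp
  rw [hlen]
  exact h

-- setting position u.length of u ++ b :: v
theorem set_mid (u v : List Char) (b c : Char) : (u ++ b :: v).set u.length c = u ++ c :: v := by
  induction u with
  | nil => rfl
  | cons x u ih => simp [ih]

-- every '0'-containing list splits at its last '0'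
theorem exists_split (s : List Char) (h0 : '0' ∈ s) :
    ∃ u v, s = u ++ '0' :: v ∧ ∀ c ∈ v, c ≠ '0' := by
  induction s using List.reverseRecOn with
  | nil => cases h0
  | append_singleton xs x ih =>
    by_cases hx : x = '0'
    · subst hx
      exact ⟨xs, [], by simp, by simp⟩
    · have h0' : '0' ∈ xs := by
        rcases List.mem_append.mp h0 with h | h
        · exact h
        · simp at h; exact absurd h.symm hx
      obtain ⟨u, v, huv, hv⟩ := ih h0'
      refine ⟨u, v ++ [x], by simp [huv], ?_⟩
      intro c hc
      rcases List.mem_append.mp hc with h | h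
      · exact hv c h
      · simp at h; subst h; exact hx

-- ---- B-side phase lemmas (the reversed loop as a foldr) ----

-- once seen = true: '1's add their place value, everything else is skipped
theorem phase_seen (i : Int) (u : List Char) (a w : Int) (p : Option Char) :
    u.foldr (fun c st => stepB i st c) (a, w, p, true)
      = (a + w * (bvalN u : Int), w * 2 ^ u.length,
         u.head?.or p, true) := by
  induction u with
  | nil => simp [bvalN]
  | cons c cs ih =>
    simp only [List.foldr_cons, ih]
    unfold stepB
    simp only [Bool.and_false, Bool.not_true, Bool.and_eq_true]
    by_cases h1 : c = '1'
    · subst h1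
      simp [bvalN, pow_succ]
      constructor <;> ring
    · have : (c == '1') = false := by simpa using h1
      simp [bvalN, h1, this, pow_succ]
      ring

theorem phase_unseen (i : Int) (v : List Char) (hv : ∀ c ∈ v, c ≠ '0') (a w : Int) (p : Option Char) :
    v.foldr (fun c st => stepB i st c) (a, w, p, false)
      = (a + w * (bvalN v : Int), w * 2 ^ v.length,
         v.head?.or p, false) := by
  induction v with
  | nil => simp [bvalN]
  | cons c cs ih =>
    have hc0 : c ≠ '0' := hv c (by simp)
    have hcs : ∀ c ∈ cs, c ≠ '0' := fun d hd => hv d (by simp [hd])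
    simp only [List.foldr_cons, ih hcs]
    unfold stepB
    have hb : (c == '0') = false := by simpa using hc0
    by_cases h1 : c = '1'
    · subst h1
      simp [bvalN, pow_succ]
      constructor <;> ring
    · have : (c == '1') = false := by simpa using h1
      simp [bvalN, h1, hb, this, pow_succ]
      ring

-- ---- per-element equality ----

theorem floordiv_pow (m : Nat) : PySem.Int.floordiv ((2:Int) ^ (m+1)) 2 = 2 ^ m := by
  rw [PySem.Int.floordiv_eq_ediv_of_pos (by norm_num), pow_succ]
  exact Int.mul_ediv_cancel _ (by norm_num)

-- B's loop value on the split s = u ++ '0' :: v (no '0' in v)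
theorem B_val (i : Int) (u v : List Char) (huv : sList i = u ++ '0' :: v)
    (hv : ∀ c ∈ v, c ≠ '0') :
    solutionElemB i
      = (bvalN v : Int) + 2 ^ v.length
        - (if PySem.Int.mod i 2 == 1 && v.head?.or none == some '1'
           then PySem.Int.floordiv ((2:Int) ^ v.length) 2 else 0)
        + 2 ^ (v.length + 1) * (bvalN u : Int) := by
  unfold solutionElemB
  rw [show ('0' :: PySem.List.slice (PySem.Int.toBinChars0b i) (some 2) none) = u ++ '0' :: v from huv]
  rw [List.foldl_reverse, List.foldr_append, List.foldr_cons]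
  rw [phase_unseen i v hv 0 1 none]
  show (List.foldr (fun c st => stepB i st c) (stepB i _ '0') u).1 = _
  rw [show stepB i (0 + 1 * (bvalN v : Int), 1 * 2 ^ v.length, v.head?.or none, false) '0'
      = ((0 + 1 * (bvalN v : Int)) + 1 * 2 ^ v.length
          - (if PySem.Int.mod i 2 == 1 && v.head?.or none == some '1'
             then PySem.Int.floordiv (1 * 2 ^ v.length) 2 else 0),
         1 * 2 ^ v.length + 1 * 2 ^ v.length, some '0', true) from by
    unfold stepB; simp]
  rw [phase_seen]
  simp only [one_mul, zero_add]
  ring_nf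

-- the three shapes '0' + bin(i)[2:] can take around the split at its last '0'
theorem shape_cases (i : Int) (u v : List Char) (huv : sList i = u ++ '0' :: v) :
    (0 ≤ i ∧ (∀ c ∈ u ++ '0' :: v, c = '0' ∨ c = '1'))
    ∨ (i < 0 ∧ u = [] ∧ v = 'b' :: Nat.toDigits 2 i.natAbs)
    ∨ (i < 0 ∧ ∃ u₂, u = '0' :: 'b' :: u₂ ∧ (∀ c ∈ u₂ ++ '0' :: v, c = '0' ∨ c = '1')) := by
  rw [sList_eq] at huv
  by_cases hneg : i < 0
  · rw [if_pos hneg] at huv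
    right
    rcases u with _ | ⟨c, u₁⟩
    · left
      refine ⟨hneg, rfl, ?_⟩
      simpa using huv.symm
    · right
      rcases u₁ with _ | ⟨d, u₂⟩
      · exfalso
        simp only [List.cons_append, List.nil_append, List.cons.injEq] at huv
        exact absurd huv.2.1.symm (by decide)
      · simp only [List.cons_append, List.cons.injEq] at huv
        obtain ⟨hc, hd, hds⟩ := huv
        refine ⟨hneg, u₂, by rw [hc, hd], ?_⟩
        intro x hx
        exact toDigits_01 i.natAbs x (by rw [hds]; exact hx)
  · rw [if_neg hneg] at huv
    left
    refine ⟨by omega, ?_⟩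
    intro c hc
    rw [← huv] at hc
    rcases List.mem_cons.mp hc with h | h
    · exact Or.inl h
    · exact toDigits_01 _ c h

theorem elem_eq (i : Int) : solutionElemA i = solutionElemB i := by
  obtain ⟨u, v, huv, hv⟩ := exists_split (sList i) List.mem_cons_self
  have hBv := B_val i u v huv hv
  have hmodpos := PySem.Int.mod_nonneg i (b := 2) (by norm_num)
  have hmodlt := PySem.Int.mod_lt i (b := 2) (by norm_num)
  unfold solutionElemA
  dsimp only
  rw [show ('0' :: PySem.List.slice (PySem.Int.toBinChars0b i) (some 2) none) = u ++ '0' :: v from huv,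
      rfind_last u v hv, PySem.List.pySetD_natCast, set_mid]
  by_cases hodd : PySem.Int.mod i 2 = 1
  · -- odd: the string ends in '1', so v is nonempty
    obtain ⟨Y, hY⟩ := sList_odd_last i hodd
    have hvne : v ≠ [] := by
      intro h
      subst h
      have h2 : Y ++ ['1'] = u ++ ['0'] := by rw [← hY, huv]
      have := congrArg List.getLast? h2
      simp at this
    obtain ⟨vh, v', rfl⟩ := List.exists_cons_of_ne_nil hvne
    rw [hodd, if_pos (by decide)]
    rw [show (u.length : Int) + 1 = ((u.length + 1 : Nat) : Int) by push_cast; ring,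
        PySem.List.pySetD_natCast,
        show u ++ '1' :: vh :: v' = (u ++ ['1']) ++ vh :: v' by simp,
        show u.length + 1 = (u ++ ['1']).length by simp, set_mid]
    rcases shape_cases i u (vh :: v') huv with ⟨hpos, h01⟩ | ⟨hneg, hu, hvds⟩ | ⟨hneg, u₂, hu, h01⟩
    · -- i ≥ 0 : everything is a plain binary digit string
      have hvh : vh = '1' := by
        rcases h01 vh (by simp) with h | h
        · exact absurd h (hv vh (by simp))
        · exact h
      subst hvh
      rw [int2?_01 _ (by simp) (by
        intro c hc
        simp only [List.append_assoc, List.cons_append, List.nil_append] at hc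
        rcases List.mem_append.mp hc with h | h
        · exact h01 c (by simp [h])
        · rcases List.mem_cons.mp h with h | h
          · exact Or.inr (by simpa using h)
          · rcases List.mem_cons.mp h with h | h
            · exact Or.inl (by simpa using h)
            · exact h01 c (by simp [h]))]
      rw [hBv, hodd]
      simp only [List.head?_cons, List.length_cons, Option.getD_some]
      rw [if_pos (by decide), floordiv_pow]
      simp only [bvalN, bvalN_append, List.length_cons, List.length_nil]
      norm_num
      ring
    · -- i < 0, the last '0' is the leading one: v = 'b' :: digits, digits all '1'
      subst hu
      cases hvds
      rw [int2?_01 _ (by simp) (by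
        intro c hc
        simp only [List.nil_append, List.cons_append, List.mem_cons] at hc
        rcases hc with h | h | h
        · exact Or.inr h
        · exact Or.inl h
        · exact toDigits_01 _ c h)]
      rw [hBv, hodd]
      simp only [List.head?_cons, List.length_cons, Option.getD_some]
      rw [if_neg (by decide)]
      simp only [bvalN, bvalN_append, List.length_cons, List.length_nil,
        List.nil_append]
      norm_num
      ring
    · -- i < 0, the split is inside the digits: the '0b' prefix survives
      subst hu
      have hvh : vh = '1' := by
        rcases h01 vh (by simp) with h | h
        · exact absurd h (hv vh (by simp))
        · exact h
      subst hvh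
      rw [show (('0' :: 'b' :: u₂) ++ ['1']) ++ '0' :: v' = '0' :: 'b' :: ((u₂ ++ ['1']) ++ '0' :: v') by simp]
      rw [int2?_0b _ (by simp) (by
        intro c hc
        simp only [List.append_assoc, List.cons_append, List.nil_append] at hc
        rcases List.mem_append.mp hc with h | h
        · exact h01 c (by simp [h])
        · rcases List.mem_cons.mp h with h | h
          · exact Or.inr (by simpa using h)
          · rcases List.mem_cons.mp h with h | h
            · exact Or.inl (by simpa using h)
            · exact h01 c (by simp [h]))]
      rw [hBv, hodd]
      simp only [List.head?_cons, List.length_cons, Option.getD_some]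
      rw [if_pos (by decide), floordiv_pow]
      simp only [bvalN, bvalN_append, List.length_cons, List.length_nil]
      norm_num
      ring
  · -- even
    have hmod0 : PySem.Int.mod i 2 = 0 := by omega
    rw [hmod0, if_neg (by decide)]
    rcases shape_cases i u v huv with ⟨hpos, h01⟩ | ⟨hneg, hu, hvds⟩ | ⟨hneg, u₂, hu, h01⟩
    · rw [int2?_01 _ (by simp) (by
        intro c hc
        rcases List.mem_append.mp hc with h | h
        · exact h01 c (by simp [h])
        · rcases List.mem_cons.mp h with h | h
          · exact Or.inr (by simpa using h)
          · exact h01 c (by simp [h]))]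
      rw [hBv, hmod0]
      simp only [show ((0:Int) == 1) = false by decide, Bool.false_and, Bool.false_eq_true,
        if_false, Option.getD_some]
      simp only [bvalN, bvalN_append, List.length_cons]
      norm_num
      ring
    · -- impossible: an even i ends its digits with '0', which would lie inside v
      exfalso
      have hpar : i.natAbs % 2 = 0 := by
        have : i % 2 = 0 := by
          rw [← PySem.Int.mod_eq_emod_of_pos (by norm_num : (0:Int) < 2)]
          exact hmod0
        omega
      obtain ⟨X, hX⟩ := toDigitsCore_last i.natAbs i.natAbs [] le_rfl
      have h0v : '0' ∈ v := by
        rw [hvds, List.mem_cons]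
        right
        show '0' ∈ Nat.toDigits 2 i.natAbs
        rw [Nat.toDigits, hX, hpar]
        simp [Nat.digitChar]
      exact hv '0' h0v rfl
    · subst hu
      rw [show (('0' :: 'b' :: u₂)) ++ '1' :: v = '0' :: 'b' :: (u₂ ++ '1' :: v) by simp]
      rw [int2?_0b _ (by simp) (by
        intro c hc
        rcases List.mem_append.mp hc with h | h
        · exact h01 c (by simp [h])
        · rcases List.mem_cons.mp h with h | h
          · exact Or.inr (by simpa using h)
          · exact h01 c (by simp [h]))]
      rw [hBv, hmod0]
      simp only [show ((0:Int) == 1) = false by decide, Bool.false_and, Bool.false_eq_true,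
        if_false, Option.getD_some]
      simp only [bvalN, bvalN_append, List.length_cons]
      norm_num
      ring

-- ===== VERDICT (by name: the statement is the Claim_ definition above) =====
theorem solution_spec : Claim_equal_solution := by
  intro numbers _
  unfold Spec_solution solution solution_alt
  rw [PySem.List.foldl_append_singleton_eq_map]
  simp [List.map_congr_left (fun i _ => elem_eq i)]
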